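-- pv_equiv track=rewrite | github.com/MrBrantCode/unitest_baseline | mut_generate/mist_train_taco/taco_11833/solution.py | is_valid_tmt_partition
-- ===== SOURCE A (Python) =====
-- def is_valid_tmt_partition(n, s):
--     if n % 3 != 0 or s.count('M') != n // 3:
--         return "NO"
--
--     t_count = 0
--     m_count = 0
--
--     # Check from left to right
--     for char in s:
--         if char == 'T':
--             t_count += 1
--         elif char == 'M':
--             m_count += 1
--             if m_count > t_count:
--                 return "NO"
--
--     t_count = 0
--     m_count = 0
--
--     # Check from right to left
--     for char in reversed(s):
--         if char == 'T':
--             t_count += 1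
--         elif char == 'M':
--             m_count += 1
--             if m_count > t_count:
--                 return "NO"
--
--     return "YES"
-- ===== SOURCE B (Python) =====
-- def is_valid_tmt_partition(n, s):
--     if n % 3 != 0 or s.count('M') != n // 3:
--         return "NO"
--     t_pos = [i for i, c in enumerate(s) if c == 'T']
--     m_pos = [i for i, c in enumerate(s) if c == 'M']
--     k = len(m_pos)
--     if len(t_pos) < k:
--         return "NO"
--     # the i-th T must come before the i-th M
--     if any(m < t for t, m in zip(t_pos, m_pos)):
--         return "NO"
--     # the i-th T from the end must come after the i-th M from the end
--     if any(t < m for t, m in zip(t_pos[len(t_pos) - k:], m_pos)):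
--         return "NO"
--     return "YES"
-- ===== Notes on version B (the rewrite author's own statement) =====
-- stated objective: alternative
-- what changed: Replaces A's two incremental-counter directional scans with one pass that records the index lists of 'T' and 'M' and then validates paired rank comparisons (i-th T before i-th M, i-th-from-end T after i-th-from-end M) on those position arrays.
import Mathlib
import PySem

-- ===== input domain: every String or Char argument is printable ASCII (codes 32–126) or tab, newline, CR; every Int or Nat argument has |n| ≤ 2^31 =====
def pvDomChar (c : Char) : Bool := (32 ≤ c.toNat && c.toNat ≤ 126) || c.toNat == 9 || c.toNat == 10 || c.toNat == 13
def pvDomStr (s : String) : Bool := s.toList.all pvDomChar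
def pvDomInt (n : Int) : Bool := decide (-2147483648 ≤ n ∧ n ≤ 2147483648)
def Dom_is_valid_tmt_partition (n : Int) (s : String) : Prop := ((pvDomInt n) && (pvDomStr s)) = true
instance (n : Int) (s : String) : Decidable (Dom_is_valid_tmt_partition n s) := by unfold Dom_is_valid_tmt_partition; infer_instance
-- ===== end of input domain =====

-- B replaces A's two incremental-counter directional scans by one pass that records the
-- position lists of 'T' and 'M' and then validates paired rank comparisons on them
-- (alternative decomposition; return value equivalence).

-- ===== PORT A =====
-- A's counter loop (both directions use the same body); false = the loop returned "NO"
def pvScanA : List Char → Int → Int → Bool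
  | [], _, _ => true
  | c :: rest, t, m =>
    if c = 'T' then pvScanA rest (t + 1) m
    else if c = 'M' then
      if m + 1 > t then false else pvScanA rest t (m + 1)
    else pvScanA rest t m

def is_valid_tmt_partition (n : Int) (s : String) : String :=
  if PySem.Int.mod n 3 ≠ 0 ∨ ((PySem.Str.count s "M" : Int) ≠ PySem.Int.floordiv n 3) then "NO"
  else if pvScanA s.toList 0 0 = false then "NO"
  else if pvScanA s.toList.reverse 0 0 = false then "NO"
  else "YES"

-- ===== PORT B =====
-- the comprehension [i for i, c in enumerate(s) if c == target]
def pvIdxOf (c : Char) : Nat → List Char → List Nat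
  | _, [] => []
  | i, d :: rest => if d = c then i :: pvIdxOf c (i + 1) rest else pvIdxOf c (i + 1) rest

def is_valid_tmt_partition_alt (n : Int) (s : String) : String :=
  if PySem.Int.mod n 3 ≠ 0 ∨ ((PySem.Str.count s "M" : Int) ≠ PySem.Int.floordiv n 3) then "NO"
  else
    let tp := pvIdxOf 'T' 0 s.toList
    let mp := pvIdxOf 'M' 0 s.toList
    let k := mp.length
    if tp.length < k then "NO"
    else if (tp.zip mp).any (fun p => p.2 < p.1) then "NO"
    -- t_pos[len(t_pos)-k:] : a slice whose start is non-negative and in range = drop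
    else if ((tp.drop (tp.length - k)).zip mp).any (fun p => p.1 < p.2) then "NO"
    else "YES"

-- ===== PRECONDITION & SPEC =====
def Spec_is_valid_tmt_partition (n : Int) (s : String) (out : String) : Prop := out = is_valid_tmt_partition_alt n s
instance (n : Int) (s : String) (out : String) : Decidable (Spec_is_valid_tmt_partition n s out) := by unfold Spec_is_valid_tmt_partition; infer_instance

-- ===== CLAIM (what is proved, stated in full; the proofs are below) =====
def Claim_equal_is_valid_tmt_partition : Prop := ∀ (n : Int) (s : String), Dom_is_valid_tmt_partition n s → Spec_is_valid_tmt_partition n s (is_valid_tmt_partition n s)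

-- ===== LEMMAS AND PROOFS =====

-- A's scan only depends on the balance t - m
def pvBal : List Char → Int → Bool
  | [], _ => true
  | c :: rest, b =>
    if c = 'T' then pvBal rest (b + 1)
    else if c = 'M' then (if b ≤ 0 then false else pvBal rest (b - 1))
    else pvBal rest b

lemma pv_scanA_eq_bal (cs : List Char) (t m : Int) : pvScanA cs t m = pvBal cs (t - m) := by
  induction cs generalizing t m with
  | nil => rfl
  | cons c rest ih =>
    by_cases hT : c = 'T'
    · subst hT
      rw [show pvScanA ('T' :: rest) t m = pvScanA rest (t + 1) m from by simp [pvScanA],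
          show pvBal ('T' :: rest) (t - m) = pvBal rest (t - m + 1) from by simp [pvBal],
          ih, show t + 1 - m = t - m + 1 from by ring]
    · by_cases hM : c = 'M'
      · subst hM
        rw [show pvScanA ('M' :: rest) t m
              = (if m + 1 > t then false else pvScanA rest t (m + 1)) from by simp [pvScanA],
            show pvBal ('M' :: rest) (t - m)
              = (if t - m ≤ 0 then false else pvBal rest (t - m - 1)) from by simp [pvBal]]
        by_cases h : m + 1 > t
        · rw [if_pos h, if_pos (by omega)]
        · rw [if_neg h, if_neg (by omega), ih, show t - (m + 1) = t - m - 1 from by ring]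
      · rw [show pvScanA (c :: rest) t m = pvScanA rest t m from by simp [pvScanA, hT, hM],
            show pvBal (c :: rest) (t - m) = pvBal rest (t - m) from by simp [pvBal, hT, hM], ih]

-- forward rank check: enough T's, and the i-th T at or before the i-th M
def pvChk (tp mp : List Nat) : Bool :=
  decide (mp.length ≤ tp.length) && (tp.zip mp).all (fun p => decide (p.1 ≤ p.2))

lemma pv_idx_ge (c : Char) (cs : List Char) (i x : Nat) (h : x ∈ pvIdxOf c i cs) : i ≤ x := by
  induction cs generalizing i with
  | nil => simp [pvIdxOf] at h
  | cons d rest ih =>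
    simp only [pvIdxOf] at h
    by_cases hd : d = c
    · rw [if_pos hd] at h
      rcases List.mem_cons.mp h with h1 | h2
      · omega
      · have := ih (i + 1) h2; omega
    · rw [if_neg hd] at h
      have := ih (i + 1) h; omega

lemma pv_idx_lt (c : Char) (cs : List Char) (i x : Nat) (h : x ∈ pvIdxOf c i cs) :
    x < i + cs.length := by
  induction cs generalizing i with
  | nil => simp [pvIdxOf] at h
  | cons d rest ih =>
    simp only [pvIdxOf] at h
    by_cases hd : d = c
    · rw [if_pos hd] at h
      rcases List.mem_cons.mp h with h1 | h2
      · simp only [List.length_cons, h1]; omega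
      · have := ih (i + 1) h2; simp only [List.length_cons]; omega
    · rw [if_neg hd] at h
      have := ih (i + 1) h; simp only [List.length_cons]; omega

lemma pv_chk_cons (x y : Nat) (l m : List Nat) :
    pvChk (x :: l) (y :: m) = (decide (x ≤ y) && pvChk l m) := by
  simp only [pvChk, List.zip_cons_cons, List.all_cons, List.length_cons,
    Nat.add_le_add_iff_right]
  cases decide (x ≤ y) <;> cases decide (m.length ≤ l.length) <;> simp

-- the invariant of A's left-to-right scan, phrased on position lists:
-- phantoms ph stand for T's already counted (all before position i)
lemma pv_chk_fwd (cs : List Char) : ∀ (i : Nat) (ph : List Nat), (∀ x ∈ ph, x < i) →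
    pvChk (ph ++ pvIdxOf 'T' i cs) (pvIdxOf 'M' i cs) = pvBal cs (ph.length : Int) := by
  induction cs with
  | nil =>
    intro i ph _
    simp [pvIdxOf, pvChk, pvBal]
  | cons c rest ih =>
    intro i ph hph
    by_cases hT : c = 'T'
    · subst hT
      rw [show pvIdxOf 'T' i ('T' :: rest) = i :: pvIdxOf 'T' (i + 1) rest from by simp [pvIdxOf],
          show pvIdxOf 'M' i ('T' :: rest) = pvIdxOf 'M' (i + 1) rest from by simp [pvIdxOf],
          show pvBal ('T' :: rest) (ph.length : Int) = pvBal rest ((ph.length : Int) + 1) from by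
            simp [pvBal]]
      have := ih (i + 1) (ph ++ [i]) (by
        intro x hx
        rcases List.mem_append.mp hx with h | h
        · have := hph x h; omega
        · simp at h; omega)
      simp only [List.append_assoc, List.singleton_append, List.length_append,
        List.length_singleton] at this
      rw [this]
      congr 1
    · by_cases hM : c = 'M'
      · subst hM
        rw [show pvIdxOf 'T' i ('M' :: rest) = pvIdxOf 'T' (i + 1) rest from by simp [pvIdxOf],
            show pvIdxOf 'M' i ('M' :: rest) = i :: pvIdxOf 'M' (i + 1) rest from by simp [pvIdxOf],
            show pvBal ('M' :: rest) (ph.length : Int)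
              = (if (ph.length : Int) ≤ 0 then false else pvBal rest ((ph.length : Int) - 1)) from by
              simp [pvBal]]
        cases ph with
        | nil =>
          rw [if_pos (by simp)]
          simp only [List.nil_append]
          cases h : pvIdxOf 'T' (i + 1) rest with
          | nil => simp [pvChk]
          | cons t0 ts =>
            have ht0 : i + 1 ≤ t0 := pv_idx_ge 'T' rest (i + 1) t0 (h ▸ List.mem_cons_self ..)
            rw [pv_chk_cons]
            simp [show ¬ (t0 ≤ i) from by omega]
        | cons y ph' =>
          rw [if_neg (by simp)]
          have hy : y < i := hph y (List.mem_cons_self ..)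
          rw [List.cons_append, pv_chk_cons,
              ih (i + 1) ph' (by intro x hx; have := hph x (List.mem_cons_of_mem _ hx); omega)]
          simp only [List.length_cons]
          rw [show ((ph'.length + 1 : Nat) : Int) - 1 = (ph'.length : Int) from by push_cast; ring]
          simp [show y ≤ i from by omega]
      · rw [show pvIdxOf 'T' i (c :: rest) = pvIdxOf 'T' (i + 1) rest from by simp [pvIdxOf, hT],
            show pvIdxOf 'M' i (c :: rest) = pvIdxOf 'M' (i + 1) rest from by simp [pvIdxOf, hM],
            show pvBal (c :: rest) (ph.length : Int) = pvBal rest (ph.length : Int) from by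
              simp [pvBal, hT, hM]]
        exact ih (i + 1) ph (by intro x hx; have := hph x hx; omega)

lemma pv_fwd (cs : List Char) :
    pvScanA cs 0 0 = pvChk (pvIdxOf 'T' 0 cs) (pvIdxOf 'M' 0 cs) := by
  have := pv_chk_fwd cs 0 [] (by simp)
  simp only [List.nil_append, List.length_nil, Nat.cast_zero] at this
  rw [pv_scanA_eq_bal, show (0 : Int) - 0 = 0 from by ring, ← this]

lemma pv_idx_append (c : Char) (xs ys : List Char) (i : Nat) :
    pvIdxOf c i (xs ++ ys) = pvIdxOf c i xs ++ pvIdxOf c (i + xs.length) ys := by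
  induction xs generalizing i with
  | nil => simp [pvIdxOf]
  | cons d rest ih =>
    simp only [List.cons_append, pvIdxOf, List.length_cons]
    rw [show i + (rest.length + 1) = (i + 1) + rest.length from by omega]
    by_cases hd : d = c <;> simp [hd, ih]

lemma pv_idx_shift (c : Char) (cs : List Char) : ∀ i : Nat,
    pvIdxOf c (i + 1) cs = (pvIdxOf c i cs).map (· + 1) := by
  induction cs with
  | nil => intro i; simp [pvIdxOf]
  | cons d rest ih =>
    intro i
    simp only [pvIdxOf]
    by_cases hd : d = c <;> simp [hd, ih (i + 1)]

lemma pv_map_succ_sub (L : Nat) (P : List Nat) :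
    (P.map (· + 1)).map (fun j => L - j) = P.map (fun j => L - 1 - j) := by
  rw [List.map_map]
  apply List.map_congr_left
  intro j _
  simp only [Function.comp_apply]
  omega

lemma pv_idx_reverse (c : Char) (cs : List Char) :
    pvIdxOf c 0 cs.reverse = ((pvIdxOf c 0 cs).map (fun j => cs.length - 1 - j)).reverse := by
  induction cs with
  | nil => simp [pvIdxOf]
  | cons d rest ih =>
    rw [show (d :: rest).reverse = rest.reverse ++ [d] from by simp,
        pv_idx_append, ih]
    simp only [List.length_reverse, Nat.zero_add, List.length_cons]
    rw [show pvIdxOf c 0 (d :: rest)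
          = (if d = c then 0 :: pvIdxOf c 1 rest else pvIdxOf c 1 rest) from by simp [pvIdxOf],
        show pvIdxOf c 1 rest = (pvIdxOf c 0 rest).map (· + 1) from pv_idx_shift c rest 0]
    by_cases hd : d = c
    · rw [if_pos hd, show pvIdxOf c rest.length [d] = [rest.length] from by simp [pvIdxOf, hd]]
      simp only [List.map_cons, List.reverse_cons, Nat.add_sub_cancel, Nat.sub_zero]
      rw [pv_map_succ_sub]
    · rw [if_neg hd, show pvIdxOf c rest.length [d] = [] from by simp [pvIdxOf, hd]]
      simp only [List.append_nil, Nat.add_sub_cancel]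
      rw [pv_map_succ_sub]

lemma pv_zip_reverse {α β : Type} (a : List α) (b : List β) (h : a.length = b.length) :
    a.reverse.zip b.reverse = (a.zip b).reverse := by
  induction a generalizing b with
  | nil =>
    cases b with
    | nil => simp
    | cons y b' => simp at h
  | cons x a' ih =>
    cases b with
    | nil => simp at h
    | cons y b' =>
      have hl : a'.length = b'.length := by simpa using h
      simp only [List.reverse_cons]
      rw [List.zip_append (by simp [hl]), ih b' hl]
      simp [List.zip_cons_cons]

lemma pv_all_congr {α : Type} (l : List α) (p q : α → Bool) (h : ∀ x ∈ l, p x = q x) :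
    l.all p = l.all q := by
  induction l with
  | nil => rfl
  | cons a t ih =>
    simp only [List.all_cons, h a (List.mem_cons_self ..),
      ih (fun x hx => h x (List.mem_cons_of_mem _ hx))]

-- the right-to-left scan, read off the original position lists
lemma pv_chk_rev (cs : List Char)
    (h : (pvIdxOf 'M' 0 cs).length ≤ (pvIdxOf 'T' 0 cs).length) :
    pvChk (pvIdxOf 'T' 0 cs.reverse) (pvIdxOf 'M' 0 cs.reverse)
      = (((pvIdxOf 'T' 0 cs).drop ((pvIdxOf 'T' 0 cs).length - (pvIdxOf 'M' 0 cs).length)).zip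
          (pvIdxOf 'M' 0 cs)).all (fun p => decide (p.2 ≤ p.1)) := by
  set tp := pvIdxOf 'T' 0 cs with htp
  set mp := pvIdxOf 'M' 0 cs with hmp
  set f : Nat → Nat := fun j => cs.length - 1 - j with hf
  set d := tp.length - mp.length with hd
  rw [pv_idx_reverse, pv_idx_reverse, ← htp, ← hmp, ← hf]
  have hsplit : (tp.map f).reverse
      = ((tp.map f).drop d).reverse ++ ((tp.map f).take d).reverse := by
    rw [← List.reverse_append, List.take_append_drop]
  have hzip : (tp.map f).reverse.zip (mp.map f).reverse
      = (((tp.map f).drop d).zip (mp.map f)).reverse := by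
    rw [hsplit, show (mp.map f).reverse = (mp.map f).reverse ++ [] from by simp,
        List.zip_append (by simp [hd]; omega)]
    simp only [List.zip_nil_right, List.append_nil]
    exact pv_zip_reverse _ _ (by simp [hd]; omega)
  unfold pvChk
  rw [hzip]
  simp only [List.length_reverse, List.length_map, List.all_reverse]
  rw [decide_eq_true h, Bool.true_and,
      show (tp.map f).drop d = (tp.drop d).map f from (List.map_drop ..).symm,
      List.zip_map, List.all_map]
  apply pv_all_congr
  intro p hp
  obtain ⟨h1, h2⟩ := List.of_mem_zip hp
  have ht : p.1 < cs.length := by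
    have := pv_idx_lt 'T' cs 0 p.1 (htp ▸ List.mem_of_mem_drop h1)
    omega
  have hm : p.2 < cs.length := by
    have := pv_idx_lt 'M' cs 0 p.2 (hmp ▸ h2)
    omega
  simp only [Function.comp_apply, Prod.map_fst, Prod.map_snd, hf]
  congr 1
  rw [eq_iff_iff]
  omega

lemma pv_all_le_not_any_lt (l : List (Nat × Nat)) :
    (l.all fun p => decide (p.1 ≤ p.2)) = !(l.any fun p => decide (p.2 < p.1)) := by
  induction l with
  | nil => rfl
  | cons a t ih =>
    by_cases h : a.2 < a.1
    · simp [List.all_cons, List.any_cons, h, show ¬ (a.1 ≤ a.2) from by omega]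
    · simp [List.all_cons, List.any_cons, ih, h, show a.1 ≤ a.2 from by omega]

lemma pv_all_ge_not_any_lt (l : List (Nat × Nat)) :
    (l.all fun p => decide (p.2 ≤ p.1)) = !(l.any fun p => decide (p.1 < p.2)) := by
  induction l with
  | nil => rfl
  | cons a t ih =>
    by_cases h : a.1 < a.2
    · simp [List.all_cons, List.any_cons, h, show ¬ (a.2 ≤ a.1) from by omega]
    · simp [List.all_cons, List.any_cons, ih, h, show a.2 ≤ a.1 from by omega]

-- ===== VERDICT (by name: the statement is the Claim_ definition above) =====
theorem is_valid_tmt_partition_spec : Claim_equal_is_valid_tmt_partition := by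
  intro n s _
  unfold Spec_is_valid_tmt_partition is_valid_tmt_partition is_valid_tmt_partition_alt
  by_cases hg : PySem.Int.mod n 3 ≠ 0 ∨ ((PySem.Str.count s "M" : Int) ≠ PySem.Int.floordiv n 3)
  · simp only [if_pos hg]
  · simp only [if_neg hg]
    set cs := s.toList with hcs
    set tp := pvIdxOf 'T' 0 cs with htp
    set mp := pvIdxOf 'M' 0 cs with hmp
    by_cases hlen : tp.length < mp.length
    · have hSF : pvScanA cs 0 0 = false := by
        rw [pv_fwd, ← htp, ← hmp]
        simp [pvChk, show ¬ (mp.length ≤ tp.length) from by omega]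
      simp [hSF, hlen]
    · have hSF : pvScanA cs 0 0
          = !(tp.zip mp).any (fun p => decide (p.2 < p.1)) := by
        rw [pv_fwd, ← htp, ← hmp, ← pv_all_le_not_any_lt]
        simp [pvChk, show mp.length ≤ tp.length from by omega]
      have hSR : pvScanA cs.reverse 0 0
          = !((tp.drop (tp.length - mp.length)).zip mp).any (fun p => decide (p.1 < p.2)) := by
        rw [pv_fwd, pv_chk_rev cs (by rw [← htp, ← hmp]; omega), ← htp, ← hmp,
            pv_all_ge_not_any_lt]
      simp only [if_neg hlen, hSF, hSR]
      cases hF : (tp.zip mp).any (fun p => decide (p.2 < p.1)) <;>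
        cases hB : ((tp.drop (tp.length - mp.length)).zip mp).any (fun p => decide (p.1 < p.2)) <;>
        simp
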